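-- pv_equiv track=rewrite | github.com/NasherDenn/DSE2.0_v.2 | YKR/utilities_db.py | transform_name_table
-- ===== SOURCE A (Python) =====
-- def transform_name_table(name_table: list) -> dict:
--     # итоговый словарь отсортированных номеров таблиц их дат
--     new_list_table_and_date = {}
--     # индикатор первого прохода поиска
--     first_check_date = True
--     for i in name_table:
--         # если первый проход
--         if first_check_date:
--             new_list_table = remove_add_change(i[0])
--             new_list_table_and_date[i[1]] = sorted(new_list_table)
--             first_check_date = False
--         # иначе начинаем проверять все возможные комбинации новой даты и предыдущей
--         else:
--             # если новая дата уже есть в конечном словаре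
--             if i[1] in new_list_table_and_date.keys():
--                 new_list_table = remove_add_change(i[0])
--                 # перезаписываем номера таблиц в дате, которая уже есть в конечном словаре
--                 new_list_table_and_date[i[1]] = new_list_table_and_date[i[1]] + sorted(new_list_table)
--             # иначе, если новой даты нет в конечном словаре
--             else:
--                 new_list_table = remove_add_change(i[0])
--                 # записываем новые номера таблиц с новой датой в конечный словарь
--                 new_list_table_and_date[i[1]] = sorted(new_list_table)
--     return new_list_table_and_date
--
-- def remove_add_change(raw_tables: str) -> list:
--     # обнуляем список обработанных номеров таблиц
--     new_list_table = []
--     list_table = raw_tables.split('\n')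
--     list_table = list(set(list_table))
--     for ii in list_table:
--         name_table = '_' + ii.replace('-', '_')
--         new_list_table.append(name_table)
--     return new_list_table
-- ===== SOURCE B (Python) =====
-- def transform_name_table(name_table: list) -> dict:
--     # distinct dates in first-encounter order, then one full scan per date
--     dates = dict.fromkeys(d for _, d in name_table)
--     return {date: [t for raw, d in name_table if d == date
--                    for t in sorted('_' + line.replace('-', '_')
--                                    for line in set(raw.split('\n')))]
--             for date in dates}
-- ===== Notes on version B (the rewrite author's own statement) =====
-- stated objective: alternative
-- what changed: B drops A's incremental dict-accumulation with a first-pass flag entirely: it first computes the distinct dates in first-encounter order (dict.fromkeys), then for each date re-scans the whole table once, concatenating sorted transformed line sets of the matching rows (the helper is inlined as a generator); O(k*n) re-scan instead of A's single accumulating pass.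
import Mathlib
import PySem

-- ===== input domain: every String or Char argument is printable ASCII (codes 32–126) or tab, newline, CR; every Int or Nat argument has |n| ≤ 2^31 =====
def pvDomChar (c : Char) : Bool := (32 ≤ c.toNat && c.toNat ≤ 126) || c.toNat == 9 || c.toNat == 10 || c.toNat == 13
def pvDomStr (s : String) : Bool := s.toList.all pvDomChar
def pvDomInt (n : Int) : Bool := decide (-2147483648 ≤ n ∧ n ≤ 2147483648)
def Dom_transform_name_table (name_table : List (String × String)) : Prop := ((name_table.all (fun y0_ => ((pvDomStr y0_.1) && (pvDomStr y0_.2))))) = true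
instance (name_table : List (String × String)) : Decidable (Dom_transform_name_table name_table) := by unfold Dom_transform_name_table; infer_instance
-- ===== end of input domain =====

-- B replaces A's single accumulating pass by distinct-dates-first then one full re-scan per date (objective: alternative decomposition).

-- ===== PORT A =====
-- A's helper remove_add_change (list(set(..)) order is irrelevant downstream: the caller sorts)
def remove_add_change (raw_tables : String) : List String :=
  let list_table := (PySem.Str.split? raw_tables "\n").getD []  -- sep ≠ "": split? is some here
  let list_table := PySem.Set.ofList list_table
  list_table.foldl (fun acc ii => acc ++ [PySem.Str.join "" ["_", PySem.Str.replace ii "-" "_"]]) []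

-- the for-loop of A, with the first_check_date flag, state = the result dict
def transform_name_table_loop (l : List (String × String))
    (d : PySem.Dict String (List String)) (first : Bool) : PySem.Dict String (List String) :=
  match l with
  | [] => d
  | i :: rest =>
    if first then
      transform_name_table_loop rest
        (d.insert i.2 (PySem.List.sorted (remove_add_change i.1) (fun x => x) false)) false
    else if d.contains i.2 then
      transform_name_table_loop rest
        (d.insert i.2 (d.getD i.2 [] ++ PySem.List.sorted (remove_add_change i.1) (fun x => x) false)) false
    else
      transform_name_table_loop rest
        (d.insert i.2 (PySem.List.sorted (remove_add_change i.1) (fun x => x) false)) false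

def transform_name_table (name_table : List (String × String)) : List (String × List String) :=
  (transform_name_table_loop name_table PySem.Dict.empty true).items

-- ===== PORT B =====
def transform_name_table_alt (name_table : List (String × String)) : List (String × List String) :=
  -- dates = dict.fromkeys(d for _, d in name_table)
  let dates := PySem.List.dedup (name_table.map (fun p => p.2))
  -- {date: [t for raw, d in name_table if d == date for t in sorted(...)] for date in dates}
  dates.map (fun date =>
    (date, name_table.flatMap (fun p =>
      if p.2 == date then
        PySem.List.sorted ((PySem.Set.ofList ((PySem.Str.split? p.1 "\n").getD [])).map
          (fun line => PySem.Str.join "" ["_", PySem.Str.replace line "-" "_"])) (fun x => x) false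
      else [])))

-- ===== PRECONDITION & SPEC =====
def Spec_transform_name_table (name_table : List (String × String)) (out : List (String × List String)) : Prop := out = transform_name_table_alt name_table
instance (name_table : List (String × String)) (out : List (String × List String)) : Decidable (Spec_transform_name_table name_table out) := by unfold Spec_transform_name_table; infer_instance

-- ===== CLAIM (what is proved, stated in full; the proofs are below) =====
def Claim_equal_transform_name_table : Prop := ∀ (name_table : List (String × String)), Dom_transform_name_table name_table → Spec_transform_name_table name_table (transform_name_table name_table)

-- ===== LEMMAS AND PROOFS =====
def pvProc (raw : String) : List String :=
  PySem.List.sorted (remove_add_change raw) (fun x => x) false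

def pvStep (d : PySem.Dict String (List String)) (p : String × String) : PySem.Dict String (List String) :=
  d.modify p.2 [] (fun v => v ++ pvProc p.1)

-- A's branch structure is exactly a modify with default []
theorem pvLoop_eq_foldl (l : List (String × String)) (d : PySem.Dict String (List String)) :
    transform_name_table_loop l d false = l.foldl pvStep d := by
  induction l generalizing d with
  | nil => rfl
  | cons i rest ih =>
    simp only [transform_name_table_loop, List.foldl_cons, if_neg (Bool.false_ne_true)]
    by_cases h : d.contains i.2 = true
    · rw [if_pos h, ih]
      simp only [pvStep, PySem.Dict.modify, pvProc]
    · rw [if_neg h, ih]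
      congr 1
      have hg : d.getD i.2 [] = [] := by
        apply PySem.Dict.getD_of_not_contains; simpa using h
      simp [pvStep, PySem.Dict.modify, hg, pvProc]

theorem pvGetD_foldl (l : List (String × String)) (d : PySem.Dict String (List String)) (c : String) :
    (l.foldl pvStep d).getD c [] =
      d.getD c [] ++ l.flatMap (fun p => if p.2 == c then pvProc p.1 else []) := by
  induction l generalizing d with
  | nil => simp
  | cons i rest ih =>
    simp only [List.foldl_cons, List.flatMap_cons, ih]
    rw [pvStep, PySem.Dict.getD_modify]
    by_cases h : c = i.2
    · simp [h]
    · simp [h, Ne.symm h]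

-- ===== VERDICT (by name: the statement is the Claim_ definition above) =====
theorem transform_name_table_spec : Claim_equal_transform_name_table := by
  intro name_table _
  show transform_name_table name_table = transform_name_table_alt name_table
  have hloop : transform_name_table_loop name_table PySem.Dict.empty true =
      name_table.foldl pvStep PySem.Dict.empty := by
    cases name_table with
    | nil => rfl
    | cons i rest =>
      simp only [transform_name_table_loop, List.foldl_cons]
      rw [pvLoop_eq_foldl, if_pos trivial]
      simp only [pvStep, PySem.Dict.modify, pvProc, PySem.Dict.getD_empty, List.nil_append]
  unfold transform_name_table transform_name_table_alt
  rw [hloop]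
  have hnodup : (name_table.foldl pvStep PySem.Dict.empty).keys.Nodup := by
    exact PySem.Dict.nodup_keys_foldl_modify_key name_table (fun p => p.2) []
      (fun d p v => v ++ pvProc p.1) PySem.Dict.empty (by simp)
  rw [PySem.Dict.items_eq_map_keys _ hnodup []]
  have hkeys : (name_table.foldl pvStep PySem.Dict.empty).keys =
      PySem.Set.ofList (name_table.map (fun p => p.2)) := by
    have := PySem.Dict.keys_foldl_modify_key name_table (fun p => p.2) []
      (fun d p v => v ++ pvProc p.1) PySem.Dict.empty
    simpa [PySem.Set.update, PySem.Set.ofList_eq_foldl] using this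
  rw [hkeys]
  simp only [PySem.List.dedup_eq_ofList]
  apply List.map_congr_left
  intro date _
  rw [pvGetD_foldl]
  simp only [PySem.Dict.getD_empty, List.nil_append]
  refine congrArg (Prod.mk date) (List.flatMap_congr (fun p _ => ?_))
  by_cases h : (p.2 == date) = true
  · simp only [h, if_true, pvProc, remove_add_change,
      PySem.List.foldl_append_singleton_eq_map, List.nil_append]
  · simp [h]
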